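-- pv_equiv track=rewrite | github.com/fylmr/CryptoCross | grid.py | find_max_space_h
-- ===== SOURCE A (Python) =====
-- def find_max_space_h(grid):
--     """Найти максимальное место в {grid} по горизонтали
--     """
--     res = 0
--
--     for line in grid:
--         count = 0
--         for i in line:
--             if count > res:
--                 res = count
--             if i == '#':
--                 count = 0
--             else:
--                 count += 1
--         if count > res:
--             res = count
--
--     return res
-- ===== SOURCE B (Python) =====
-- def find_max_space_h(grid):
--     """Max horizontal run of non-'#' cells: per line, collect the '#' cut
--     positions and take the largest gap between consecutive cuts."""
--     best = 0
--     for line in grid: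
--         cuts = [-1] + [i for i, c in enumerate(line) if c == '#'] + [len(line)]
--         gap = max(b - a - 1 for a, b in zip(cuts, cuts[1:]))
--         best = max(best, gap)
--     return best
-- ===== Notes on version B (the rewrite author's own statement) =====
-- stated objective: idiomatic
-- what changed: Replaced the running-counter state machine with a tokenize-then-measure pass: per line, collect the '#' cut positions and take the maximal gap between consecutive cuts (with -1 and len(line) as sentinels).
import Mathlib
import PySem

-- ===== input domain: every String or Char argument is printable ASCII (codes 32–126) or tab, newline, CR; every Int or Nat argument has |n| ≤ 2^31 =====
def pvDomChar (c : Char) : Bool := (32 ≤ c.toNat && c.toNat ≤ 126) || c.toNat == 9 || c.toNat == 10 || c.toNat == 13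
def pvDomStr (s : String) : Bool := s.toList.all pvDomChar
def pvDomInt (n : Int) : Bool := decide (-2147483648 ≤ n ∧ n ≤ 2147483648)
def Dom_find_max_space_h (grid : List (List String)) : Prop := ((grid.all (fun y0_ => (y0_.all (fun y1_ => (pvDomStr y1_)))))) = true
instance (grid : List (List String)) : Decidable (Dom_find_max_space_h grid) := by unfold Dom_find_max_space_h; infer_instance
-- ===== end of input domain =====

-- B replaces A's running-counter state machine by a cuts-and-gaps pass per line (idiomatic, same cost).

-- ===== PORT A =====
-- the inner loop body over state (res, count)
def pvStepA (st : Int × Int) (i : String) : Int × Int :=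
  let res := if st.2 > st.1 then st.2 else st.1
  if i == "#" then (res, 0) else (res, st.2 + 1)

def pvLineA (res : Int) (line : List String) : Int :=
  let st := line.foldl pvStepA (res, 0)
  if st.2 > st.1 then st.2 else st.1

def find_max_space_h (grid : List (List String)) : Int :=
  grid.foldl pvLineA 0

-- ===== PORT B =====
-- cuts = [-1] + [i for i, c in enumerate(line) if c == '#'] + [len(line)]
def pvCuts (line : List String) : List Int :=
  [-1] ++ ((PySem.List.enumerate line).filterMap (fun p => if p.2 == "#" then some p.1 else none))
       ++ [(line.length : Int)]

-- gap = max(b - a - 1 for a, b in zip(cuts, cuts[1:]))   (python max over a nonempty int list)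
def pvGap (line : List String) : Int :=
  let cuts := pvCuts line
  ((PySem.List.max? ((cuts.zip cuts.tail).map (fun p => p.2 - p.1 - 1)) (fun y => y)).getD 0)

def find_max_space_h_alt (grid : List (List String)) : Int :=
  grid.foldl (fun best line => max best (pvGap line)) 0

-- ===== PRECONDITION & SPEC =====
def Spec_find_max_space_h (grid : List (List String)) (out : Int) : Prop := out = find_max_space_h_alt grid
instance (grid : List (List String)) (out : Int) : Decidable (Spec_find_max_space_h grid out) := by unfold Spec_find_max_space_h; infer_instance

-- ===== CLAIM (what is proved, stated in full; the proofs are below) =====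
def Claim_equal_find_max_space_h : Prop := ∀ (grid : List (List String)), Dom_find_max_space_h grid → Spec_find_max_space_h grid (find_max_space_h grid)

-- ===== LEMMAS AND PROOFS =====

-- S line c: max count reached by A's inner loop starting from count c (including the final count)
def pvS : List String → Int → Int
  | [], c => c
  | x :: xs, c => max c (pvS xs (if x == "#" then 0 else c + 1))

-- G a ps n: max gap between consecutive cuts a :: ps ++ [n]
def pvG : Int → List Int → Int → Int
  | a, [], n => n - a - 1
  | a, p :: ps, n => max (p - a - 1) (pvG p ps n)

-- hash positions, recursively
def pvPos : List String → List Int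
  | [] => []
  | x :: xs => if x == "#" then 0 :: (pvPos xs).map (· + 1) else (pvPos xs).map (· + 1)

def pvFin (st : Int × Int) : Int := if st.2 > st.1 then st.2 else st.1

theorem pvStepA_fst (st : Int × Int) (i : String) :
    (pvStepA st i) = (max st.1 st.2, if i == "#" then 0 else st.2 + 1) := by
  simp only [pvStepA]
  split <;> simp <;> omega

-- A's per-line result = max res (S line c)
theorem pvLineA_eq (line : List String) : ∀ res c,
    pvFin (line.foldl pvStepA (res, c)) = max res (pvS line c) := by
  induction line with
  | nil => intro res c; simp [pvS, pvFin]; omega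
  | cons x xs ih =>
    intro res c
    simp only [List.foldl_cons, pvStepA_fst, pvS]
    rw [ih]
    omega

theorem pvG_shift (ps : List Int) : ∀ a n, pvG (a + 1) (ps.map (· + 1)) (n + 1) = pvG a ps n := by
  induction ps with
  | nil => intro a n; simp only [List.map_nil, pvG]; omega
  | cons p ps ih =>
    intro a n
    simp only [List.map_cons, pvG]
    rw [ih]
    omega

theorem pvG_lb (ps : List Int) : ∀ a n, (∀ p ∈ ps, 0 ≤ p) → 0 ≤ n → -a - 1 ≤ pvG a ps n := by
  induction ps with
  | nil => intro a n _ hn; simp only [pvG]; omega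
  | cons p ps ih =>
    intro a n hps hn
    have hp : 0 ≤ p := hps p (by simp)
    simp only [pvG]
    have := le_max_left (p - a - 1) (pvG p ps n)
    omega

theorem pvPos_nonneg (line : List String) : ∀ p ∈ pvPos line, 0 ≤ p := by
  induction line with
  | nil => simp [pvPos]
  | cons x xs ih =>
    intro p hp
    simp only [pvPos] at hp
    split at hp <;> simp only [List.mem_cons, List.mem_map] at hp
    · rcases hp with rfl | ⟨q, hq, rfl⟩
      · omega
      · have := ih q hq; omega
    · rcases hp with ⟨q, hq, rfl⟩
      have := ih q hq
      omega

-- A's per-line max equals the max gap of the hash positions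
theorem pvS_eq_G (line : List String) : ∀ c, 0 ≤ c →
    pvS line c = pvG (-1 - c) (pvPos line) (line.length : Int) := by
  induction line with
  | nil => intro c _; simp [pvS, pvPos, pvG]
  | cons x xs ih =>
    intro c hc
    simp only [pvS, pvPos, List.length_cons]
    cases hx : (x == "#") with
    | true =>
      simp only [if_true]
      rw [ih 0 le_rfl]
      simp only [pvG]
      have h1 : pvG (0:Int) ((pvPos xs).map (· + 1)) ((xs.length : Int) + 1) = pvG (-1) (pvPos xs) (xs.length : Int) := by
        have := pvG_shift (pvPos xs) (-1) (xs.length : Int)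
        simpa using this
      push_cast
      rw [h1]
      omega
    | false =>
      simp only [Bool.false_eq_true, if_false]
      rw [ih (c + 1) (by omega)]
      have h1 : pvG (-1 - c) ((pvPos xs).map (· + 1)) ((xs.length : Int) + 1) = pvG (-1 - c - 1) (pvPos xs) (xs.length : Int) := by
        have := pvG_shift (pvPos xs) (-1 - c - 1) (xs.length : Int)
        simpa using this
      have h2 : -1 - c - 1 = -1 - (c + 1) := by omega
      have h3 := pvG_lb (pvPos xs) (-1 - c - 1) (xs.length : Int) (pvPos_nonneg xs) (by positivity)
      push_cast
      rw [h1, h2]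
      rw [h2] at h3
      omega

-- the filterMap over enumerate computes pvPos
theorem pvEnum_shift (line : List String) : ∀ s : Int,
    ((PySem.List.enumerate line s).filterMap (fun p => if p.2 == "#" then some p.1 else none))
      = (pvPos line).map (· + s) := by
  induction line with
  | nil => intro s; simp [PySem.List.enumerate_nil, pvPos]
  | cons x xs ih =>
    intro s
    have hf : ∀ t : List Int, (t.map (· + 1)).map (· + s) = t.map (· + (s + 1)) := by
      intro t
      rw [List.map_map]
      apply List.map_congr_left
      intro a _
      simp only [Function.comp_apply]
      omega
    rw [PySem.List.enumerate_cons]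
    cases hx : (x == "#") with
    | true =>
      simp only [List.filterMap_cons, hx, if_true, pvPos, List.map_cons]
      rw [ih (s + 1), hf]
      norm_num
    | false =>
      simp only [List.filterMap_cons, hx, Bool.false_eq_true, if_false, pvPos]
      rw [ih (s + 1), hf]

theorem pvCuts_eq (line : List String) :
    pvCuts line = (-1) :: (pvPos line ++ [(line.length : Int)]) := by
  simp only [pvCuts]
  rw [show PySem.List.enumerate line = PySem.List.enumerate line 0 from rfl, pvEnum_shift]
  simp

-- the gaps list of a cuts list a :: ps ++ [n]
def pvGaps : Int → List Int → Int → List Int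
  | a, [], n => [n - a - 1]
  | a, p :: ps, n => (p - a - 1) :: pvGaps p ps n

theorem pvZipGaps (ps : List Int) : ∀ a n,
    ((((a :: (ps ++ [n])).zip (ps ++ [n])).map (fun p => p.2 - p.1 - 1))) = pvGaps a ps n := by
  induction ps with
  | nil => intro a n; simp [pvGaps]
  | cons p ps ih => intro a n; simpa [pvGaps] using ih p n

theorem pvFoldMax (l : List Int) : ∀ c m : Int, l.foldl max (max c m) = max c (l.foldl max m) := by
  induction l with
  | nil => intro c m; simp
  | cons x l ih =>
    intro c m
    simp only [List.foldl_cons]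
    rw [show max (max c m) x = max c (max m x) from by omega, ih]

theorem pvMaxGaps (ps : List Int) : ∀ a n,
    (PySem.List.max? (pvGaps a ps n) (fun y => y)).getD 0 = pvG a ps n := by
  induction ps with
  | nil => intro a n; simp [pvGaps, pvG, PySem.List.max?_id_cons]
  | cons p ps ih =>
    intro a n
    simp only [pvGaps, pvG]
    rcases hps : pvGaps p ps n with _ | ⟨g, gs⟩
    · cases ps <;> simp [pvGaps] at hps
    · rw [PySem.List.max?_id_cons]
      have h2 := ih p n
      rw [hps, PySem.List.max?_id_cons] at h2
      simp only [List.foldl_cons, Option.getD_some] at *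
      rw [pvFoldMax gs (p - a - 1) g, h2]

theorem pvGap_eq (line : List String) : pvGap line = pvG (-1) (pvPos line) (line.length : Int) := by
  simp only [pvGap, pvCuts_eq]
  rw [show ((-1 : Int) :: (pvPos line ++ [(line.length : Int)])).tail = pvPos line ++ [(line.length : Int)] from rfl]
  rw [pvZipGaps, pvMaxGaps]

theorem pvLine_eq (res : Int) (line : List String) : pvLineA res line = max res (pvGap line) := by
  have h : pvLineA res line = pvFin (line.foldl pvStepA (res, 0)) := rfl
  rw [h, pvLineA_eq, pvGap_eq, pvS_eq_G line 0 le_rfl]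
  norm_num

-- ===== VERDICT (by name: the statement is the Claim_ definition above) =====
theorem pvFold_eq (grid : List (List String)) : ∀ r : Int,
    grid.foldl pvLineA r = grid.foldl (fun best line => max best (pvGap line)) r := by
  induction grid with
  | nil => intro r; rfl
  | cons line gs ih =>
    intro r
    simp only [List.foldl_cons, pvLine_eq]
    exact ih _

theorem find_max_space_h_spec : Claim_equal_find_max_space_h := by
  intro grid _
  unfold Spec_find_max_space_h find_max_space_h find_max_space_h_alt
  exact pvFold_eq grid 0
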